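-- pv_equiv track=rewrite | github.com/lsh424/algorithm | etc/balloon.py | solution
-- ===== SOURCE A (Python) =====
-- def solution(a):
--     l = len(a)
--     ls = [0] * l
--     left_min = float('inf')
--     right_min = float('inf')
--
--     for i in range(l):
--         if a[i] < left_min:
--             ls[i] = 1
--             left_min = a[i]
--         if a[l - i - 1] < right_min:
--             ls[l - i - 1] = 1
--             right_min = a[l - i - 1]
--
--     return sum(ls)
-- ===== SOURCE B (Python) =====
-- def solution(a):
--     return sum(
--         1
--         for i in range(len(a))
--         if all(a[i] < x for x in a[:i]) or all(a[i] < x for x in a[i+1:])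
--     )
-- ===== Notes on version B (the rewrite author's own statement) =====
-- stated objective: simpler
-- what changed: Drops A's stateful interleaved running-minimum scan entirely: B checks the defining property of each index directly, comparing a[i] against its whole prefix slice and whole suffix slice with all(), trading A's O(n) two-pointer state machine for a stateless quadratic definitional count.
import Mathlib
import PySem

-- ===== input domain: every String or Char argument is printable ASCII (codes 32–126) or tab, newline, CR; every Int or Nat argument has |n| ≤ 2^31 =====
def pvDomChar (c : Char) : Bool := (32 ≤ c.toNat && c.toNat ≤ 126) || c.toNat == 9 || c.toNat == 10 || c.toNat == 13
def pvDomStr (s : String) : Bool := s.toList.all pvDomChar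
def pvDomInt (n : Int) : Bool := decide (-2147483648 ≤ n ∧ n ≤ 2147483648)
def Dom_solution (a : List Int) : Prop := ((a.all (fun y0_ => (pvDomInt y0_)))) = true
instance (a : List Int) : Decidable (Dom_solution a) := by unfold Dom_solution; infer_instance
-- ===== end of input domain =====

-- B replaces A's stateful interleaved running-minimum scan by a stateless definitional count:
-- each index is checked directly against its whole prefix and suffix slices (simpler, O(n^2)).

-- ===== PORT A =====
-- Python's float('inf') sentinel is modelled by Option Int (none = +inf); exact here since all
-- compared values are ints.
def pvLtInf (x : Int) : Option Int → Bool
  | none => true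
  | some v => decide (x < v)

-- one iteration of A's loop; indices i and l-i-1 are always in range, so Python's a[i] is
-- List.getD (exact here), and Python's l-i-1 ≥ 0 matches Nat subtraction.
def stepA (l : Nat) (a : List Int) (st : List Int × Option Int × Option Int) (i : Nat) :
    List Int × Option Int × Option Int :=
  let ls := st.1
  let lm := st.2.1
  let rm := st.2.2
  let p := if pvLtInf (a.getD i 0) lm then (ls.set i 1, some (a.getD i 0)) else (ls, lm)
  let q := if pvLtInf (a.getD (l - i - 1) 0) rm then
             (p.1.set (l - i - 1) 1, some (a.getD (l - i - 1) 0)) else (p.1, rm)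
  (q.1, p.2, q.2)

def solution (a : List Int) : Int :=
  let l := a.length
  let st := (List.range l).foldl (stepA l a) (List.replicate l 0, none, none)
  st.1.sum

-- ===== PORT B =====
-- a[:i] with 0 ≤ i is List.take i, a[i+1:] is List.drop (i+1) (exact: i is in range);
-- a[i] with 0 ≤ i < len is getD; sum of the generator is a foldl over range.
def solution_alt (a : List Int) : Int :=
  (List.range a.length).foldl
    (fun acc i =>
      if (a.take i).all (fun x => a.getD i 0 < x) ∨ (a.drop (i+1)).all (fun x => a.getD i 0 < x)
      then acc + 1 else acc) 0

-- ===== PRECONDITION & SPEC =====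
def Spec_solution (a : List Int) (out : Int) : Prop := out = solution_alt a
instance (a : List Int) (out : Int) : Decidable (Spec_solution a out) := by unfold Spec_solution; infer_instance

-- ===== CLAIM (what is proved, stated in full; the proofs are below) =====
def Claim_equal_solution : Prop := ∀ (a : List Int), Dom_solution a → Spec_solution a (solution a)

-- ===== LEMMAS AND PROOFS =====

-- i is a strict record seen from the left / from the right
abbrev LeftRec (a : List Int) (i : Nat) : Prop := ∀ j, j < i → a.getD i 0 < a.getD j 0
abbrev RightRec (a : List Int) (i : Nat) : Prop :=
  ∀ j, j < a.length → i < j → a.getD i 0 < a.getD j 0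

-- running prefix minimum of a over indices 0..k
def pmf (a : List Int) : Nat → Int
  | 0 => a.getD 0 0
  | k+1 => if a.getD (k+1) 0 < pmf a k then a.getD (k+1) 0 else pmf a k

-- A's marking array / running minima after k iterations of its loop
def lsSpec (a : List Int) (k : Nat) : List Int :=
  (List.range a.length).map (fun i =>
    if (i < k ∧ LeftRec a i) ∨ (a.length - k ≤ i ∧ RightRec a i) then 1 else 0)
def lmO (a : List Int) (k : Nat) : Option Int :=
  if k = 0 then none else some (pmf a (k-1))

theorem lt_pmf_iff (a : List Int) (k : Nat) (x : Int) :
    x < pmf a k ↔ ∀ j, j ≤ k → x < a.getD j 0 := by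
  induction k with
  | zero => simp [pmf]
  | succ m ih =>
    simp only [pmf]
    split
    · rename_i hc
      constructor
      · intro hx j hj
        rcases Nat.lt_succ_iff_lt_or_eq.mp (Nat.lt_succ_of_le hj) with h | h
        · exact ih.mp (lt_trans hx hc) j (Nat.lt_succ_iff.mp h)
        · simpa [h] using hx
      · intro h; exact h (m+1) le_rfl
    · rename_i hc
      rw [not_lt] at hc
      constructor
      · intro hx j hj
        rcases Nat.le_succ_iff.mp hj with h | h
        · exact ih.mp hx j h
        · exact h ▸ lt_of_lt_of_le hx hc
      · intro h
        exact ih.mpr (fun j hj => h j (le_trans hj (Nat.le_succ m)))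

theorem getD_reverse (a : List Int) (i : Nat) (h : i < a.length) :
    a.reverse.getD i 0 = a.getD (a.length - 1 - i) 0 := by
  rw [List.getD_eq_getElem?_getD, List.getD_eq_getElem?_getD,
    List.getElem?_eq_getElem (by simpa using h),
    List.getElem?_eq_getElem (by omega)]
  simp [List.getElem_reverse]

theorem count_foldl (p : Nat → Prop) [DecidablePred p] (xs : List Nat) (acc : Int) :
    xs.foldl (fun acc i => if p i then acc + 1 else acc) acc
      = acc + ((xs.map fun i => if p i then (1:Int) else 0)).sum := by
  induction xs generalizing acc with
  | nil => simp
  | cons y ys ih =>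
    simp only [List.foldl_cons, List.map_cons, List.sum_cons, ih]
    split <;> ring

theorem rightRec_iff_leftRec_reverse (a : List Int) (i : Nat) (h : i < a.length) :
    RightRec a i ↔ LeftRec a.reverse (a.length - 1 - i) := by
  unfold RightRec LeftRec
  constructor
  · intro hr j hj
    rw [getD_reverse a _ (by omega), getD_reverse a j (by omega)]
    have : a.length - 1 - (a.length - 1 - i) = i := by omega
    rw [this]
    exact hr (a.length - 1 - j) (by omega) (by omega)
  · intro hl j hj hij
    have := hl (a.length - 1 - j) (by omega)
    rw [getD_reverse a _ (by omega), getD_reverse a _ (by omega)] at this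
    have e1 : a.length - 1 - (a.length - 1 - i) = i := by omega
    have e2 : a.length - 1 - (a.length - 1 - j) = j := by omega
    rw [e1, e2] at this
    exact this

theorem pvLtInf_lmO (b : List Int) (k : Nat) (x : Int) :
    pvLtInf x (lmO b k) = true ↔ ∀ j, j < k → x < b.getD j 0 := by
  cases k with
  | zero => simp [lmO, pvLtInf]
  | succ m =>
    simp only [lmO, Nat.succ_ne_zero, if_false, pvLtInf, decide_eq_true_eq,
      Nat.add_sub_cancel, lt_pmf_iff]
    constructor
    · intro h j hj; exact h j (Nat.lt_succ_iff.mp hj)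
    · intro h j hj; exact h j (Nat.lt_succ_of_le hj)

theorem lmO_succ (b : List Int) (k : Nat) :
    lmO b (k+1) = if pvLtInf (b.getD k 0) (lmO b k) then some (b.getD k 0) else lmO b k := by
  cases k with
  | zero => simp [lmO, pmf, pvLtInf]
  | succ m =>
    simp only [lmO, Nat.succ_ne_zero, if_false, Nat.add_sub_cancel, pvLtInf]
    simp only [pmf, decide_eq_true_eq]
    split <;> rfl

theorem set_map_range (f : Nat → Int) (n k : Nat) (v : Int) :
    ((List.range n).map f).set k v = (List.range n).map (fun i => if i = k then v else f i) := by
  apply List.ext_getElem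
  · simp
  · intro i h1 h2
    rw [List.getElem_set]
    simp only [List.getElem_map, List.getElem_range]
    simp at h1
    split
    · rename_i h; simp [h.symm]
    · rename_i h; rw [if_neg (fun hh => h hh.symm)]

theorem newCond_iff (a : List Int) (k i : Nat) (hk : k < a.length) (_hi : i < a.length) :
    ((i < k+1 ∧ LeftRec a i) ∨ (a.length - (k+1) ≤ i ∧ RightRec a i)) ↔
    (((i = a.length - k - 1 ∧ RightRec a (a.length - k - 1)) ∨
      (i = k ∧ LeftRec a k)) ∨
     ((i < k ∧ LeftRec a i) ∨ (a.length - k ≤ i ∧ RightRec a i))) := by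
  constructor
  · rintro (⟨h, hl⟩ | ⟨h, hr⟩)
    · by_cases e : i = k
      · exact Or.inl (Or.inr ⟨e, e ▸ hl⟩)
      · exact Or.inr (Or.inl ⟨by omega, hl⟩)
    · by_cases e : i = a.length - k - 1
      · exact Or.inl (Or.inl ⟨e, e ▸ hr⟩)
      · exact Or.inr (Or.inr ⟨by omega, hr⟩)
  · rintro ((⟨e, hr⟩ | ⟨e, hl⟩) | (⟨h, hl⟩ | ⟨h, hr⟩))
    · exact Or.inr ⟨by omega, e ▸ hr⟩
    · exact Or.inl ⟨by omega, e ▸ hl⟩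
    · exact Or.inl ⟨by omega, hl⟩
    · exact Or.inr ⟨by omega, hr⟩

theorem lsSpec_succ (a : List Int) (k : Nat) (hk : k < a.length) :
    lsSpec a (k+1) = (List.range a.length).map (fun i =>
      if i = a.length - k - 1 ∧ RightRec a (a.length - k - 1) then 1 else
      if i = k ∧ LeftRec a k then 1 else
      if (i < k ∧ LeftRec a i) ∨ (a.length - k ≤ i ∧ RightRec a i) then 1 else 0) := by
  unfold lsSpec
  apply List.map_congr_left
  intro i hi
  rw [List.mem_range] at hi
  rw [← ite_or, ← ite_or]
  exact if_congr (newCond_iff a k i hk hi) rfl rfl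

theorem invA (a : List Int) (k : Nat) (hk : k ≤ a.length) :
    (List.range k).foldl (stepA a.length a) (List.replicate a.length 0, none, none)
      = (lsSpec a k, lmO a k, lmO a.reverse k) := by
  induction k with
  | zero =>
    simp only [List.range_zero, List.foldl_nil]
    have h0 : lsSpec a 0 = List.replicate a.length 0 := by
      unfold lsSpec
      apply List.ext_getElem
      · simp
      · intro i h1 h2
        simp only [List.getElem_map, List.getElem_range, List.getElem_replicate]
        rw [if_neg]
        rintro (⟨hx, _⟩ | ⟨hx, _⟩) <;> simp at h1 <;> omega
    rw [h0]
    simp [lmO]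
  | succ k ih =>
    have hk' : k < a.length := hk
    rw [List.range_succ, List.foldl_append, ih (le_of_lt hk')]
    simp only [List.foldl_cons, List.foldl_nil]
    have hrev : a.reverse.getD k 0 = a.getD (a.length - k - 1) 0 := by
      rw [getD_reverse a k hk']
      congr 1
      omega
    have hRiff : RightRec a (a.length - k - 1) ↔ LeftRec a.reverse k := by
      rw [rightRec_iff_leftRec_reverse a _ (by omega)]
      have e : a.length - 1 - (a.length - k - 1) = k := by omega
      rw [e]
    show stepA a.length a (lsSpec a k, lmO a k, lmO a.reverse k) k = _
    unfold stepA
    simp only []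
    rw [lmO_succ a k, lmO_succ a.reverse k, lsSpec_succ a k hk', hrev]
    by_cases hL : LeftRec a k <;> by_cases hR : RightRec a (a.length - k - 1)
    · have bL : pvLtInf (a.getD k 0) (lmO a k) = true := (pvLtInf_lmO a k _).mpr hL
      have bR : pvLtInf (a.getD (a.length - k - 1) 0) (lmO a.reverse k) = true := by
        rw [← hrev]
        exact (pvLtInf_lmO a.reverse k _).mpr (hRiff.mp hR)
      simp only [if_pos bL, if_pos bR]
      refine congrArg₂ Prod.mk ?_ rfl
      unfold lsSpec
      rw [set_map_range, set_map_range]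
      apply List.map_congr_left
      intro i _
      by_cases e1 : i = a.length - k - 1
      · rw [if_pos e1, if_pos (⟨e1, hR⟩ : i = a.length - k - 1 ∧ RightRec a (a.length - k - 1))]
      · rw [if_neg e1, if_neg (show ¬(i = a.length - k - 1 ∧ RightRec a (a.length - k - 1)) from fun h => e1 h.1)]
        by_cases e2 : i = k
        · rw [if_pos e2, if_pos (⟨e2, hL⟩ : i = k ∧ LeftRec a k)]
        · rw [if_neg e2, if_neg (show ¬(i = k ∧ LeftRec a k) from fun h => e2 h.1)]
    · have bL : pvLtInf (a.getD k 0) (lmO a k) = true := (pvLtInf_lmO a k _).mpr hL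
      have nbR : ¬ (pvLtInf (a.getD (a.length - k - 1) 0) (lmO a.reverse k) = true) := by
        intro hb
        rw [← hrev] at hb
        exact hR (hRiff.mpr ((pvLtInf_lmO a.reverse k _).mp hb))
      simp only [if_pos bL, if_neg nbR]
      refine congrArg₂ Prod.mk ?_ rfl
      unfold lsSpec
      rw [set_map_range]
      apply List.map_congr_left
      intro i _
      rw [if_neg (show ¬(i = a.length - k - 1 ∧ RightRec a (a.length - k - 1)) from fun h => hR h.2)]
      by_cases e2 : i = k
      · rw [if_pos e2, if_pos (⟨e2, hL⟩ : i = k ∧ LeftRec a k)]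
      · rw [if_neg e2, if_neg (show ¬(i = k ∧ LeftRec a k) from fun h => e2 h.1)]
    · have nbL : ¬ (pvLtInf (a.getD k 0) (lmO a k) = true) :=
        fun hb => hL ((pvLtInf_lmO a k _).mp hb)
      have bR : pvLtInf (a.getD (a.length - k - 1) 0) (lmO a.reverse k) = true := by
        rw [← hrev]
        exact (pvLtInf_lmO a.reverse k _).mpr (hRiff.mp hR)
      simp only [if_neg nbL, if_pos bR]
      refine congrArg₂ Prod.mk ?_ rfl
      unfold lsSpec
      rw [set_map_range]
      apply List.map_congr_left
      intro i _
      by_cases e1 : i = a.length - k - 1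
      · rw [if_pos e1, if_pos (⟨e1, hR⟩ : i = a.length - k - 1 ∧ RightRec a (a.length - k - 1))]
      · rw [if_neg e1, if_neg (show ¬(i = a.length - k - 1 ∧ RightRec a (a.length - k - 1)) from fun h => e1 h.1), if_neg (show ¬(i = k ∧ LeftRec a k) from fun h => hL h.2)]
    · have nbL : ¬ (pvLtInf (a.getD k 0) (lmO a k) = true) :=
        fun hb => hL ((pvLtInf_lmO a k _).mp hb)
      have nbR : ¬ (pvLtInf (a.getD (a.length - k - 1) 0) (lmO a.reverse k) = true) := by
        intro hb
        rw [← hrev] at hb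
        exact hR (hRiff.mpr ((pvLtInf_lmO a.reverse k _).mp hb))
      simp only [if_neg nbL, if_neg nbR]
      refine congrArg₂ Prod.mk ?_ rfl
      unfold lsSpec
      apply List.map_congr_left
      intro i _
      rw [if_neg (show ¬(i = a.length - k - 1 ∧ RightRec a (a.length - k - 1)) from fun h => hR h.2), if_neg (show ¬(i = k ∧ LeftRec a k) from fun h => hL h.2)]

theorem solution_eq_count (a : List Int) :
    solution a = ((List.range a.length).map fun i =>
      if LeftRec a i ∨ RightRec a i then (1:Int) else 0).sum := by
  show ((List.range a.length).foldl (stepA a.length a)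
      (List.replicate a.length 0, none, none)).1.sum = _
  rw [invA a a.length le_rfl]
  unfold lsSpec
  simp only []
  congr 1
  apply List.map_congr_left
  intro i hi
  rw [List.mem_range] at hi
  refine if_congr ?_ rfl rfl
  constructor
  · rintro (⟨_, h⟩ | ⟨_, h⟩)
    · exact Or.inl h
    · exact Or.inr h
  · rintro (h | h)
    · exact Or.inl ⟨hi, h⟩
    · exact Or.inr ⟨by omega, h⟩

theorem all_take_iff (a : List Int) (i : Nat) (hi : i < a.length) :
    (a.take i).all (fun x => a.getD i 0 < x) = true ↔ LeftRec a i := by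
  rw [List.all_eq_true]
  unfold LeftRec
  constructor
  · intro h j hj
    have hm : a.getD j 0 ∈ a.take i := by
      rw [List.getD_eq_getElem?_getD, List.getElem?_eq_getElem (by omega)]
      have : a[j] = (a.take i)[j]'(by simp; omega) := by simp
      rw [Option.getD_some, this]
      exact List.getElem_mem _
    simpa using h _ hm
  · intro h x hx
    rcases List.mem_iff_getElem.mp hx with ⟨j, hj, rfl⟩
    have hj' : j < i := by simp at hj; omega
    have := h j hj'
    simp only [List.getD_eq_getElem?_getD,
      List.getElem?_eq_getElem (show j < a.length by omega),
      List.getElem?_eq_getElem hi, Option.getD_some] at this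
    simpa [List.getElem_take, List.getD_eq_getElem?_getD,
      List.getElem?_eq_getElem hi] using this

theorem all_drop_iff (a : List Int) (i : Nat) (hi : i < a.length) :
    (a.drop (i+1)).all (fun x => a.getD i 0 < x) = true ↔ RightRec a i := by
  rw [List.all_eq_true]
  unfold RightRec
  constructor
  · intro h j hj hij
    have hm : a.getD j 0 ∈ a.drop (i+1) := by
      rw [List.getD_eq_getElem?_getD, List.getElem?_eq_getElem hj]
      have : a[j] = (a.drop (i+1))[j - (i+1)]'(by simp; omega) := by
        rw [List.getElem_drop]; congr 1; omega
      rw [Option.getD_some, this]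
      exact List.getElem_mem _
    simpa using h _ hm
  · intro h x hx
    rcases List.mem_iff_getElem.mp hx with ⟨t, ht, rfl⟩
    rw [List.getElem_drop]
    have ht' : i + 1 + t < a.length := by simp at ht; omega
    have := h (i+1+t) ht' (by omega)
    simp only [List.getD_eq_getElem?_getD, List.getElem?_eq_getElem ht',
      List.getElem?_eq_getElem hi, Option.getD_some] at this
    simpa [List.getD_eq_getElem?_getD, List.getElem?_eq_getElem hi] using this

theorem solution_alt_eq_count (a : List Int) :
    solution_alt a = ((List.range a.length).map fun i =>
      if LeftRec a i ∨ RightRec a i then (1:Int) else 0).sum := by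
  unfold solution_alt
  rw [count_foldl (fun i =>
      (a.take i).all (fun x => a.getD i 0 < x) = true ∨
      (a.drop (i+1)).all (fun x => a.getD i 0 < x) = true)]
  rw [zero_add]
  apply congrArg
  apply List.map_congr_left
  intro i hi
  rw [List.mem_range] at hi
  refine if_congr ?_ rfl rfl
  rw [all_take_iff a i hi, all_drop_iff a i hi]

-- ===== VERDICT (by name: the statement is the Claim_ definition above) =====
theorem solution_spec : Claim_equal_solution := by
  intro a _
  show solution a = solution_alt a
  rw [solution_eq_count, solution_alt_eq_count]
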